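-- pv_equiv track=rewrite | github.com/orange472/SushiGoSolver | state.py | _calculate_score_without_maki
-- ===== SOURCE A (Python) =====
-- from typing import List
--
-- def _calculate_score_without_maki(collection: List[int]):
--     maki_count: int = 0
--     wasabi_count: int = 0
--     tempura_count: int = 0
--     sashimi_count: int = 0
--     dumpling_count: int = 0
--     score: int = 0
--
--     for card in collection:
--         # Tempura
--         if card == 0:
--             tempura_count += 1
--         # Sashimi
--         elif card == 1:
--             sashimi_count += 1
--         # Dumpling
--         elif card == 2:
--             dumpling_count += 1
--         # Maki roll, count 1
--         elif card == 3:
--             maki_count += 1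
--         # Maki roll, count 2
--         elif card == 4:
--             maki_count += 2
--         # Maki roll, count 3
--         elif card == 5:
--             maki_count += 3
--         # Wasabi
--         elif card == 9:
--             wasabi_count += 1
--         # At this point, card must be Nigiri
--         elif wasabi_count > 0:
--             score += 9 if card == 7 else 6 if card == 6 else 3
--             wasabi_count -= 1
--         else:
--             score += 3 if card == 7 else 2 if card == 6 else 1
--
--         if tempura_count == 2:
--             score += 5
--             tempura_count = 0
--
--         if sashimi_count == 3:
--             score += 10
--             sashimi_count = 0
--
--     if dumpling_count >= 5:
--         score += 15
--     elif dumpling_count == 4: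
--         score += 10
--     elif dumpling_count == 3:
--         score += 6
--     elif dumpling_count == 2:
--         score += 3
--     elif dumpling_count == 1:
--         score += 1
--
--     return score, maki_count
-- ===== SOURCE B (Python) =====
-- from typing import List
--
-- def _calculate_score_without_maki(collection: List[int]):
--     # staged passes: closed-form conversions from raw counts, then a scan of
--     # only the wasabi/nigiri subsequence (the one part that is order-dependent)
--     maki = sum(c - 2 for c in collection if 3 <= c <= 5)
--     score = collection.count(0) // 2 * 5 + collection.count(1) // 3 * 10
--     score += [0, 1, 3, 6, 10, 15][min(collection.count(2), 5)]
--     wasabi = 0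
--     for c in collection:
--         if c in (0, 1, 2, 3, 4, 5):
--             continue
--         if c == 9:
--             wasabi += 1
--         else:
--             base = 3 if c == 7 else 2 if c == 6 else 1
--             if wasabi:
--                 wasabi -= 1
--                 base *= 3
--             score += base
--     return score, maki
-- ===== Notes on version B (the rewrite author's own statement) =====
-- stated objective: alternative
-- what changed: B replaces A's single fused state-machine loop (six counters with in-loop +5/+10 threshold resets) by staged passes: list.count() tallies converted to points by closed forms (count//2)*5 and (count//3)*10, the dumpling ladder as a six-entry table lookup indexed by min(count,5), the maki total as one comprehension sum, and a separate scan that keeps only wasabi state for the order-dependent wasabi/nigiri pairing.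
import Mathlib
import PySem

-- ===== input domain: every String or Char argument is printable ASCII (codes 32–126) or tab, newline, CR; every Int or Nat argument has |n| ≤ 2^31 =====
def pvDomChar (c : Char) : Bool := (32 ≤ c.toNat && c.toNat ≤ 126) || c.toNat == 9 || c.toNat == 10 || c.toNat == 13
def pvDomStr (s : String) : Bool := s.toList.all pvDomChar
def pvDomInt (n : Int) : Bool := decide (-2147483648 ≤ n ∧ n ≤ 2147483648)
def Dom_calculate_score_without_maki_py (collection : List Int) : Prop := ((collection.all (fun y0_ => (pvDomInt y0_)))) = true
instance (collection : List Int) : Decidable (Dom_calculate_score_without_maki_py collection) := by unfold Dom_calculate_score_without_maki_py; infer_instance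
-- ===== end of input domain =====

-- B stages the computation: closed-form point conversions from raw counts plus a scan of only
-- the order-dependent wasabi/nigiri subsequence; alternative decomposition, same cost.


-- ===== PORT A =====
-- A's state: (maki, wasabi, tempura, sashimi, dumpling, score)
def pvAPost (st : Int × Int × Int × Int × Int × Int) : Int × Int × Int × Int × Int × Int :=
  match st with
  | (maki, wasabi, tempura, sashimi, dumpling, score) =>
    let ts : Int × Int := if tempura = 2 then (0, score + 5) else (tempura, score)
    let ss : Int × Int := if sashimi = 3 then (0, ts.2 + 10) else (sashimi, ts.2)
    (maki, wasabi, ts.1, ss.1, dumpling, ss.2)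

def pvAStep (st : Int × Int × Int × Int × Int × Int) (card : Int) : Int × Int × Int × Int × Int × Int :=
  match st with
  | (maki, wasabi, tempura, sashimi, dumpling, score) =>
    pvAPost
      (if card = 0 then (maki, wasabi, tempura + 1, sashimi, dumpling, score)
       else if card = 1 then (maki, wasabi, tempura, sashimi + 1, dumpling, score)
       else if card = 2 then (maki, wasabi, tempura, sashimi, dumpling + 1, score)
       else if card = 3 then (maki + 1, wasabi, tempura, sashimi, dumpling, score)
       else if card = 4 then (maki + 2, wasabi, tempura, sashimi, dumpling, score)
       else if card = 5 then (maki + 3, wasabi, tempura, sashimi, dumpling, score)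
       else if card = 9 then (maki, wasabi + 1, tempura, sashimi, dumpling, score)
       else if wasabi > 0 then
         (maki, wasabi - 1, tempura, sashimi, dumpling,
          score + (if card = 7 then 9 else if card = 6 then 6 else 3))
       else
         (maki, wasabi, tempura, sashimi, dumpling,
          score + (if card = 7 then 3 else if card = 6 then 2 else 1)))

def calculate_score_without_maki_py (collection : List Int) : Int × Int :=
  match collection.foldl pvAStep (0, 0, 0, 0, 0, 0) with
  | (maki, _wasabi, _tempura, _sashimi, dumpling, score) =>
    let score :=
      if dumpling ≥ 5 then score + 15
      else if dumpling = 4 then score + 10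
      else if dumpling = 3 then score + 6
      else if dumpling = 2 then score + 3
      else if dumpling = 1 then score + 1
      else score
    (score, maki)

-- ===== PORT B =====
-- the loop over the wasabi/nigiri subsequence: state (wasabi, score), 'continue' = identity
def pvBLoop (st : Int × Int) (c : Int) : Int × Int :=
  if c = 0 ∨ c = 1 ∨ c = 2 ∨ c = 3 ∨ c = 4 ∨ c = 5 then st
  else if c = 9 then (st.1 + 1, st.2)
  else
    let base : Int := if c = 7 then 3 else if c = 6 then 2 else 1
    if st.1 ≠ 0 then (st.1 - 1, st.2 + base * 3)
    else (st.1, st.2 + base)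

def calculate_score_without_maki_py_alt (collection : List Int) : Int × Int :=
  let maki : Int := ((collection.filter (fun c => decide (3 ≤ c) && decide (c ≤ 5))).map (fun c => c - 2)).sum
  let score : Int := PySem.Int.floordiv (PySem.List.count collection 0 : Int) 2 * 5
                   + PySem.Int.floordiv (PySem.List.count collection 1 : Int) 3 * 10
  -- the index min(count,5) always lies in [0,5], so pyGet? is some; '.getD 0' only totalizes
  let score : Int := score + ((PySem.List.pyGet? ([0, 1, 3, 6, 10, 15] : List Int) (min (PySem.List.count collection 2 : Int) 5)).getD 0)
  let st := collection.foldl pvBLoop (0, score)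
  (st.2, maki)

-- ===== PRECONDITION & SPEC =====
def Spec_calculate_score_without_maki_py (collection : List Int) (out : Int × Int) : Prop := out = calculate_score_without_maki_py_alt collection
instance (collection : List Int) (out : Int × Int) : Decidable (Spec_calculate_score_without_maki_py collection out) := by unfold Spec_calculate_score_without_maki_py; infer_instance

-- ===== CLAIM =====
def Claim_equal_calculate_score_without_maki_py : Prop := ∀ (collection : List Int), Dom_calculate_score_without_maki_py collection → Spec_calculate_score_without_maki_py collection (calculate_score_without_maki_py collection)

-- ===== LEMMAS AND PROOFS =====

-- proof-only fused accumulator: (tempura, sashimi, dumpling, maki, wasabi, score)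
def pvBStep (st : Int × Int × Int × Int × Int × Int) (card : Int) : Int × Int × Int × Int × Int × Int :=
  match st with
  | (tempura, sashimi, dumpling, maki, wasabi, score) =>
    if card = 0 then (tempura + 1, sashimi, dumpling, maki, wasabi, score)
    else if card = 1 then (tempura, sashimi + 1, dumpling, maki, wasabi, score)
    else if card = 2 then (tempura, sashimi, dumpling + 1, maki, wasabi, score)
    else if 3 ≤ card ∧ card ≤ 5 then (tempura, sashimi, dumpling, maki + (card - 2), wasabi, score)
    else if card = 9 then (tempura, sashimi, dumpling, maki, wasabi + 1, score)
    else
      let base : Int := if card = 7 then 3 else if card = 6 then 2 else 1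
      if wasabi > 0 then (tempura, sashimi, dumpling, maki, wasabi - 1, score + 3 * base)
      else (tempura, sashimi, dumpling, maki, wasabi, score + base)

-- the simulation map from the fused state to A's state
def pvPhi (st : Int × Int × Int × Int × Int × Int) : Int × Int × Int × Int × Int × Int :=
  match st with
  | (t, s, d, m, w, sc) => (m, w, t % 2, s % 3, d, sc + 5 * (t / 2) + 10 * (s / 3))

set_option maxHeartbeats 2000000 in
theorem pvStep_comm (st : Int × Int × Int × Int × Int × Int) (card : Int) :
    pvAStep (pvPhi st) card = pvPhi (pvBStep st card) := by
  obtain ⟨t, s, d, m, w, sc⟩ := st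
  simp only [pvAStep, pvBStep, pvPhi]
  split_ifs <;>
    simp only [pvAPost, Prod.mk.injEq] <;>
    split_ifs <;> dsimp only <;> and_intros <;> first | trivial | omega

theorem pvFold_comm (lst : List Int) (st : Int × Int × Int × Int × Int × Int) :
    lst.foldl pvAStep (pvPhi st) = pvPhi (lst.foldl pvBStep st) := by
  induction lst generalizing st with
  | nil => rfl
  | cons c cs ih => simpa [pvStep_comm] using ih (pvBStep st c)

-- pvBLoop step facts
theorem pvBLoop_skip (st : Int × Int) (c : Int)
    (h : c = 0 ∨ c = 1 ∨ c = 2 ∨ c = 3 ∨ c = 4 ∨ c = 5) : pvBLoop st c = st := by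
  simp [pvBLoop, h]

theorem pvBLoop_nine (st : Int × Int) : pvBLoop st 9 = (st.1 + 1, st.2) := by
  simp [pvBLoop]

theorem pvBLoop_nigiri (st : Int × Int) (c : Int)
    (h : ¬(c = 0 ∨ c = 1 ∨ c = 2 ∨ c = 3 ∨ c = 4 ∨ c = 5)) (h9 : c ≠ 9) :
    pvBLoop st c =
      (let base : Int := if c = 7 then 3 else if c = 6 then 2 else 1;
       if st.1 ≠ 0 then (st.1 - 1, st.2 + base * 3) else (st.1, st.2 + base)) := by
  simp [pvBLoop, h, h9]

theorem pvBLoop_affine_step (w sc c : Int) :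
    pvBLoop (w, sc) c = ((pvBLoop (w, 0) c).1, sc + (pvBLoop (w, 0) c).2) := by
  simp only [pvBLoop]
  split_ifs <;> simp

theorem pvBLoop_affine (lst : List Int) (w sc : Int) :
    lst.foldl pvBLoop (w, sc) = ((lst.foldl pvBLoop (w, 0)).1, sc + (lst.foldl pvBLoop (w, 0)).2) := by
  induction lst generalizing w sc with
  | nil => simp
  | cons c cs ih =>
    simp only [List.foldl_cons]
    rw [pvBLoop_affine_step]
    obtain ⟨a, b⟩ := pvBLoop (w, 0) c
    rw [ih a (sc + b), ih a b]
    simp [add_assoc]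

-- the fused fold decomposes into raw counts, the maki sum, and the wasabi/nigiri scan
theorem pvBStep_decomp (lst : List Int) (t s d m w sc : Int) (hw : 0 ≤ w) :
    lst.foldl pvBStep (t, s, d, m, w, sc) =
      (t + (List.count 0 lst : Int), s + (List.count 1 lst : Int), d + (List.count 2 lst : Int),
       m + ((lst.filter (fun c => decide (3 ≤ c) && decide (c ≤ 5))).map (fun c => c - 2)).sum,
       (lst.foldl pvBLoop (w, sc)).1, (lst.foldl pvBLoop (w, sc)).2) := by
  induction lst generalizing t s d m w sc with
  | nil => simp
  | cons c cs ih =>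
    simp only [List.foldl_cons]
    by_cases h1 : c = 0
    · subst h1
      have e : pvBStep (t, s, d, m, w, sc) 0 = (t + 1, s, d, m, w, sc) := by simp [pvBStep]
      rw [e, ih _ _ _ _ _ _ hw, pvBLoop_skip (w, sc) 0 (Or.inl rfl)]
      simp [Prod.ext_iff]
      omega
    by_cases h2 : c = 1
    · subst h2
      have e : pvBStep (t, s, d, m, w, sc) 1 = (t, s + 1, d, m, w, sc) := by simp [pvBStep]
      rw [e, ih _ _ _ _ _ _ hw, pvBLoop_skip (w, sc) 1 (Or.inr (Or.inl rfl))]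
      simp [Prod.ext_iff]
      omega
    by_cases h3 : c = 2
    · subst h3
      have e : pvBStep (t, s, d, m, w, sc) 2 = (t, s, d + 1, m, w, sc) := by simp [pvBStep]
      rw [e, ih _ _ _ _ _ _ hw, pvBLoop_skip (w, sc) 2 (Or.inr (Or.inr (Or.inl rfl)))]
      simp [Prod.ext_iff]
      omega
    by_cases h4 : 3 ≤ c ∧ c ≤ 5
    · have e : pvBStep (t, s, d, m, w, sc) c = (t, s, d, m + (c - 2), w, sc) := by
        simp [pvBStep, h1, h2, h3, h4]
      rw [e, ih _ _ _ _ _ _ hw, pvBLoop_skip (w, sc) c (by omega)]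
      simp [h1, h2, h3, h4.1, h4.2, Prod.ext_iff]
      omega
    by_cases h9 : c = 9
    · subst h9
      have e : pvBStep (t, s, d, m, w, sc) 9 = (t, s, d, m, w + 1, sc) := by
        simp [pvBStep]
      rw [e, ih _ _ _ _ _ _ (by omega), pvBLoop_nine]
      simp
    · -- nigiri card
      have hns : ¬(c = 0 ∨ c = 1 ∨ c = 2 ∨ c = 3 ∨ c = 4 ∨ c = 5) := by omega
      rw [pvBLoop_nigiri (w, sc) c hns h9]
      by_cases hw0 : w > 0
      · have e : pvBStep (t, s, d, m, w, sc) c =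
            (t, s, d, m, w - 1, sc + 3 * (if c = 7 then 3 else if c = 6 then 2 else 1)) := by
          simp [pvBStep, h1, h2, h3, h4, h9, hw0]
        rw [e, ih _ _ _ _ _ _ (by omega)]
        have hne : w ≠ 0 := by omega
        simp only [hne, if_pos, ne_eq, not_false_eq_true]
        rw [show (3 * (if c = 7 then (3:Int) else if c = 6 then 2 else 1)) =
              (if c = 7 then (3:Int) else if c = 6 then 2 else 1) * 3 from mul_comm _ _]
        simp [h1, h2, h3, show ¬((3:Int) ≤ c ∧ c ≤ 5) from h4]
      · have hw0' : w = 0 := by omega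
        subst hw0'
        have e : pvBStep (t, s, d, m, 0, sc) c =
            (t, s, d, m, 0, sc + (if c = 7 then 3 else if c = 6 then 2 else 1)) := by
          simp [pvBStep, h1, h2, h3, h4, h9]
        rw [e, ih _ _ _ _ _ _ le_rfl]
        simp [h1, h2, h3, show ¬((3:Int) ≤ c ∧ c ≤ 5) from h4]

-- the dumpling table lookup equals A's ladder of bonuses
theorem pvTable (n : Nat) :
    ((PySem.List.pyGet? ([0, 1, 3, 6, 10, 15] : List Int) (min (n : Int) 5)).getD 0) =
      (if (n : Int) ≥ 5 then 15 else if (n : Int) = 4 then 10 else if (n : Int) = 3 then 6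
       else if (n : Int) = 2 then 3 else if (n : Int) = 1 then 1 else 0) := by
  match n with
  | 0 => decide
  | 1 => decide
  | 2 => decide
  | 3 => decide
  | 4 => decide
  | (k + 5) =>
    have h5 : (5 : Int) ≤ ((k + 5 : Nat) : Int) := by push_cast; omega
    rw [min_eq_right h5, if_pos (by omega)]
    decide

theorem calculate_score_without_maki_py_spec : Claim_equal_calculate_score_without_maki_py := by
  intro collection _
  unfold Spec_calculate_score_without_maki_py
  unfold calculate_score_without_maki_py calculate_score_without_maki_py_alt
  have h0 : ((0, 0, 0, 0, 0, 0) : Int × Int × Int × Int × Int × Int) = pvPhi (0, 0, 0, 0, 0, 0) := by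
    decide
  rw [h0, pvFold_comm, pvBStep_decomp _ _ _ _ _ _ _ le_rfl]
  simp only [pvPhi, zero_add, PySem.List.count_eq]
  rw [pvBLoop_affine collection 0
      (PySem.Int.floordiv ((List.count 0 collection : Nat) : Int) 2 * 5 +
        PySem.Int.floordiv ((List.count 1 collection : Nat) : Int) 3 * 10 +
        (PySem.List.pyGet? ([0, 1, 3, 6, 10, 15] : List Int)
          (min ((List.count 2 collection : Nat) : Int) 5)).getD 0)]
  rw [pvTable, PySem.Int.floordiv_eq_ediv_of_pos (by norm_num),
    PySem.Int.floordiv_eq_ediv_of_pos (by norm_num)]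
  simp only [Prod.ext_iff]
  split_ifs <;> refine ⟨?_, trivial⟩ <;> ring_nf
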